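-- pv_equiv track=rewrite | github.com/hyunbeanohh/OIL-legacy-study | Hacker Ranks/Competive Gaming.py | numPlayers
-- ===== SOURCE A (Python) =====
-- from collections import Counter
--
-- def numPlayers(k, scores):
--     counter = Counter(scores)
--     answer, current_rank = 0 , 1
--     for i,j in sorted(counter.items(),reverse=True):
--         if current_rank > k:
--             break
--         answer += j
--         current_rank += j
--     return answer
-- ===== SOURCE B (Python) =====
-- def numPlayers(k, scores):
--     # A player is within the top k ranks iff fewer than k players scored strictly more.
--     answer = 0
--     for x in scores:
--         if sum(1 for y in scores if y > x) < k:
--             answer += 1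
--     return answer
-- ===== Notes on version B (the rewrite author's own statement) =====
-- stated objective: simpler
-- what changed: Replaces Counter + descending sort + group loop with break by a direct per-player rank test: a player counts iff fewer than k players scored strictly more.
import Mathlib
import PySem

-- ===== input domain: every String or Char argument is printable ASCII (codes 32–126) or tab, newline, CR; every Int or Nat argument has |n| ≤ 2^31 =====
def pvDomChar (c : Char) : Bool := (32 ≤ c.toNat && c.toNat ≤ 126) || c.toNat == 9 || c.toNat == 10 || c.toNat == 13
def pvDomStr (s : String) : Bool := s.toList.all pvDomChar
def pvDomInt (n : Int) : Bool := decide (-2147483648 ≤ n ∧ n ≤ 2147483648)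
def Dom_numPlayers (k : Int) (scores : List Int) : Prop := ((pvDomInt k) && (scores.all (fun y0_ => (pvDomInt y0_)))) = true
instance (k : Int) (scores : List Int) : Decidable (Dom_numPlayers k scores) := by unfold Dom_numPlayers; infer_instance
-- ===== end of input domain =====

-- B replaces Counter + descending sort + break loop by a direct per-player rank test (simpler, no sorting).

-- ===== PORT A =====
-- the 'for i,j in …: if current_rank > k: break; answer += j; current_rank += j' loop
def numPlayersLoop (k : Int) : List (Int × Int) → Int → Int → Int
  | [], answer, _ => answer
  | (_, j) :: rest, answer, current_rank =>
      if current_rank > k then answer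
      else numPlayersLoop k rest (answer + j) (current_rank + j)

-- sorted(counter.items(), reverse=True): dict keys are distinct, so Python's tuple
-- comparison never reaches the second component; sorting by the first component is exact here.
def numPlayers (k : Int) (scores : List Int) : Int :=
  numPlayersLoop k (PySem.List.sorted (PySem.Dict.counter scores).items (fun p => p.1) true) 0 1

-- ===== PORT B =====
def numPlayers_alt (k : Int) (scores : List Int) : Int :=
  scores.foldl (fun answer x =>
    if (scores.foldl (fun c y => if y > x then c + 1 else c) (0 : Int)) < k
    then answer + 1 else answer) 0

-- ===== PRECONDITION & SPEC =====
def Spec_numPlayers (k : Int) (scores : List Int) (out : Int) : Prop := out = numPlayers_alt k scores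
instance (k : Int) (scores : List Int) (out : Int) : Decidable (Spec_numPlayers k scores out) := by unfold Spec_numPlayers; infer_instance

-- ===== CLAIM (what is proved, stated in full; the proofs are below) =====
def Claim_equal_numPlayers : Prop := ∀ (k : Int) (scores : List Int), Dom_numPlayers k scores → Spec_numPlayers k scores (numPlayers k scores)

-- ===== LEMMAS AND PROOFS =====

theorem countP_disjoint (l : List Int) (p q : Int → Bool) (h : ∀ x, ¬(p x = true ∧ q x = true)) :
    l.countP (fun x => p x || q x) = l.countP p + l.countP q := by
  induction l with
  | nil => simp
  | cons a t ih =>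
    simp only [List.countP_cons, ih]
    have := h a
    cases hp : p a <;> cases hq : q a <;> simp_all <;> omega

theorem loop_main (k : Int) (scores : List Int) (gs : List Int) (a : Int)
    (h1 : gs.Pairwise (fun u v => v < u))
    (h2 : ∀ y ∈ scores, y ∈ gs ∨ (∀ v ∈ gs, v < y)) :
    numPlayersLoop k (gs.map (fun v => (v, (scores.count v : Int)))) a
      (1 + (scores.countP (fun y => decide (y ∉ gs)) : Int))
    = a + (scores.countP (fun y => decide (y ∈ gs) &&
        decide ((scores.countP (fun z => decide (y < z)) : Int) < k)) : Int) := by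
  induction gs generalizing a with
  | nil => simp [numPlayersLoop]
  | cons v rest ih =>
    have hvrest : ∀ u ∈ rest, u < v := by
      intro u hu; exact (List.pairwise_cons.mp h1).1 u hu
    have h1' := (List.pairwise_cons.mp h1).2
    have hvnotin : v ∉ rest := fun hv => lt_irrefl v (hvrest v hv)
    -- F1: for y ∈ scores, y ∉ v::rest ↔ v < y
    have F1 : ∀ y ∈ scores, (y ∉ (v :: rest) ↔ v < y) := by
      intro y hy
      constructor
      · intro hnot
        rcases h2 y hy with hmem | hgt
        · exact absurd hmem hnot
        · exact hgt v List.mem_cons_self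
      · intro hlt hmem
        rcases List.mem_cons.mp hmem with rfl | hr
        · exact lt_irrefl y hlt
        · exact lt_irrefl v (lt_trans hlt (hvrest y hr))
    have Erank : (scores.countP (fun y => decide (y ∉ (v :: rest))) : Int)
        = (scores.countP (fun z => decide (v < z)) : Int) := by
      congr 1
      exact List.countP_congr (fun y hy => by
        simpa using (F1 y hy))
    simp only [List.map_cons, numPlayersLoop]
    by_cases hk : 1 + (scores.countP (fun y => decide (y ∉ (v :: rest))) : Int) > k
    · -- break: the whole remaining sum is 0
      rw [if_pos hk]
      have hz : scores.countP (fun y => decide (y ∈ (v :: rest)) &&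
          decide ((scores.countP (fun z => decide (y < z)) : Int) < k)) = 0 := by
        rw [List.countP_eq_zero]
        intro y hy
        simp only [Bool.and_eq_true, decide_eq_true_eq, not_and]
        intro hmem
        have hyv : y ≤ v := by
          rcases List.mem_cons.mp hmem with rfl | hr
          · exact le_refl y
          · exact le_of_lt (hvrest y hr)
        have hmono : scores.countP (fun z => decide (v < z)) ≤
            scores.countP (fun z => decide (y < z)) :=
          List.countP_mono_left (fun z _ hz => by
            simp only [decide_eq_true_eq] at *; exact lt_of_le_of_lt hyv hz)
        rw [Erank] at hk
        omega
      rw [hz]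
      simp
    · rw [if_neg hk]
      -- count v as countP
      have hcnt : scores.count v = scores.countP (fun y => y == v) := by
        rw [List.count_eq_countP]
      -- gv < k
      have hgv : (scores.countP (fun z => decide (v < z)) : Int) < k := by
        rw [Erank] at hk; omega
      -- new rank:  countP (∉ rest) = countP (∉ v::rest) + count v
      have F2 : scores.countP (fun y => decide (y ∉ rest))
          = scores.countP (fun y => decide (y ∉ (v :: rest))) + scores.count v := by
        have hpt : scores.countP (fun y => decide (y ∉ rest))
            = scores.countP (fun y => decide (y ∉ (v :: rest)) || (y == v)) := by
          apply List.countP_congr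
          intro y _
          simp only [Bool.or_eq_true, decide_eq_true_eq, beq_iff_eq, List.mem_cons, not_or]
          constructor
          · intro hnr
            by_cases hyv : y = v
            · exact Or.inr hyv
            · exact Or.inl ⟨hyv, hnr⟩
          · rintro (⟨_, hnr⟩ | rfl)
            · exact hnr
            · exact hvnotin
        rw [hpt, countP_disjoint, hcnt]
        intro y hcon
        simp only [decide_eq_true_eq, beq_iff_eq, List.mem_cons, not_or] at hcon
        tauto
      -- h2 for rest
      have h2' : ∀ y ∈ scores, y ∈ rest ∨ (∀ u ∈ rest, u < y) := by
        intro y hy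
        rcases h2 y hy with hmem | hgt
        · rcases List.mem_cons.mp hmem with rfl | hr
          · exact Or.inr (fun u hu => hvrest u hu)
          · exact Or.inl hr
        · exact Or.inr (fun u hu => hgt u (List.mem_cons_of_mem v hu))
      have ihh := ih (a + (scores.count v : Int)) h1' h2'
      have hrank : 1 + (scores.countP (fun y => decide (y ∉ (v :: rest))) : Int)
            + (scores.count v : Int)
          = 1 + (scores.countP (fun y => decide (y ∉ rest)) : Int) := by
        rw [F2]; push_cast; ring
      rw [hrank, ihh]
      -- split the RHS sum
      have F3 : scores.countP (fun y => decide (y ∈ (v :: rest)) &&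
            decide ((scores.countP (fun z => decide (y < z)) : Int) < k))
          = scores.countP (fun y => decide (y ∈ rest) &&
            decide ((scores.countP (fun z => decide (y < z)) : Int) < k)) + scores.count v := by
        have hpt : scores.countP (fun y => decide (y ∈ (v :: rest)) &&
              decide ((scores.countP (fun z => decide (y < z)) : Int) < k))
            = scores.countP (fun y => (decide (y ∈ rest) &&
              decide ((scores.countP (fun z => decide (y < z)) : Int) < k)) || (y == v)) := by
          apply List.countP_congr
          intro y _
          simp only [Bool.or_eq_true, Bool.and_eq_true, decide_eq_true_eq, beq_iff_eq,
            List.mem_cons]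
          constructor
          · rintro ⟨rfl | hr, hlt⟩
            · exact Or.inr rfl
            · exact Or.inl ⟨hr, hlt⟩
          · rintro (⟨hr, hlt⟩ | rfl)
            · exact ⟨Or.inr hr, hlt⟩
            · exact ⟨Or.inl rfl, hgv⟩
        rw [hpt, countP_disjoint, hcnt]
        intro y hcon
        simp only [Bool.and_eq_true, decide_eq_true_eq, beq_iff_eq] at hcon
        obtain ⟨⟨hr, _⟩, rfl⟩ := hcon
        exact hvnotin hr
      rw [F3]
      push_cast
      ring

theorem numPlayers_spec' (k : Int) (scores : List Int) :
    numPlayers k scores = numPlayers_alt k scores := by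
  -- D is strictly descending
  have hDdesc : (PySem.List.sorted (PySem.Set.ofList scores) (fun x => x) true).Pairwise
      (fun u v => v < u) := by
    have hle := PySem.List.sorted_pairwise_rev (PySem.Set.ofList scores) (fun x => x)
    have hnd : (PySem.List.sorted (PySem.Set.ofList scores) (fun x => x) true).Nodup :=
      (PySem.List.sorted_perm (PySem.Set.ofList scores) (fun x => x) true).symm.nodup
        (PySem.Set.nodup_ofList scores)
    exact (hle.and hnd).imp (fun h => lt_of_le_of_ne h.1 (Ne.symm h.2))
  have hDmem : ∀ y, y ∈ (PySem.List.sorted (PySem.Set.ofList scores) (fun x => x) true) ↔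
      y ∈ scores := by
    intro y
    rw [PySem.List.mem_sorted, PySem.Set.mem_ofList]
  -- Step 1: sorted(counter.items(), reverse=True) keyed by fst is D paired with counts
  have hitems : PySem.List.sorted (PySem.Dict.counter scores).items (fun p => p.1) true
      = (PySem.List.sorted (PySem.Set.ofList scores) (fun x => x) true).map
          (fun v => (v, (scores.count v : Int))) := by
    rw [PySem.Dict.items_counter]
    apply PySem.List.sorted_rev_eq_of_perm_of_pairwise_gt
    · exact (PySem.List.sorted_perm (PySem.Set.ofList scores) (fun x => x) true).map _
    · rw [List.pairwise_map]
      exact hDdesc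
  -- Step 2: the loop over D's groups counts players with rank ≤ k
  have hmain := loop_main k scores
    (PySem.List.sorted (PySem.Set.ofList scores) (fun x => x) true) 0 hDdesc
    (fun y hy => Or.inl ((hDmem y).mpr hy))
  have hz : scores.countP
      (fun y => decide (y ∉ (PySem.List.sorted (PySem.Set.ofList scores) (fun x => x) true)))
      = 0 := by
    rw [List.countP_eq_zero]
    intro y hy
    simp [hDmem y, hy]
  rw [hz] at hmain
  have hfull : scores.countP
        (fun y => decide (y ∈ (PySem.List.sorted (PySem.Set.ofList scores) (fun x => x) true)) &&
          decide ((scores.countP (fun z => decide (y < z)) : Int) < k))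
      = scores.countP (fun y => decide ((scores.countP (fun z => decide (y < z)) : Int) < k)) := by
    apply List.countP_congr
    intro y hy
    simp [hDmem y, hy]
  rw [hfull] at hmain
  -- Step 3: B's two folds are the two counts
  have hB : numPlayers_alt k scores
      = 0 + (scores.countP (fun x =>
          decide ((0 + (scores.countP (fun z => decide (x < z)) : Int)) < k)) : Int) := by
    unfold numPlayers_alt
    have hinner : ∀ x : Int, scores.foldl (fun c y => if y > x then c + 1 else c) (0 : Int)
        = 0 + (scores.countP (fun z => decide (x < z)) : Int) := by
      intro x
      exact PySem.List.foldl_ite_add_one (fun y => y > x) scores 0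
    calc scores.foldl (fun answer x =>
          if (scores.foldl (fun c y => if y > x then c + 1 else c) (0 : Int)) < k
          then answer + 1 else answer) 0
        = scores.foldl (fun answer x =>
          if (0 + (scores.countP (fun z => decide (x < z)) : Int)) < k
          then answer + 1 else answer) 0 := by
          simp only [hinner]
      _ = 0 + (scores.countP (fun x =>
          decide ((0 + (scores.countP (fun z => decide (x < z)) : Int)) < k)) : Int) :=
          PySem.List.foldl_ite_add_one _ scores 0
  rw [hB]
  unfold numPlayers
  rw [hitems]
  norm_num at hmain ⊢
  rw [hmain]

-- ===== VERDICT (by name: the statement is the Claim_ definition above) =====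
theorem numPlayers_spec : Claim_equal_numPlayers := by
  intro k scores _
  exact numPlayers_spec' k scores
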